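-- pv_equiv track=rewrite | github.com/xbalaji/py01 | integer-representations/integer02.py | find_representations
-- ===== SOURCE A (Python) =====
-- def find_representations(n):
--     representations = []
--
--     for a in range(2, n):
--         for b in range(2, n):
--             c = n - a**b
--             if 0 <= c < 9:
--                 representations.append((a, b, c))
--
--     # Sort representations based on the value of 'b'
--     representations.sort(key=lambda x: x[1])
--
--     return representations
-- ===== SOURCE B (Python) =====
-- def find_representations(n):
--     representations = []
--     a = 2
--     while a * a <= n:
--         p = a * a
--         b = 2
--         while p <= n:
--             if p > n - 9:
--                 representations.append((a, b, n - p))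
--             p *= a
--             b += 1
--         a += 1
--     representations.sort(key=lambda x: x[1])
--     return representations
-- ===== Notes on version B (the rewrite author's own statement) =====
-- stated objective: faster
-- what changed: B enumerates only the actual powers (outer loop over bases a while a*a <= n, inner running product p = a^b while p <= n, test p > n-9) instead of scanning every base-exponent pair below n and recomputing a**b each time; the same stable sort by b follows.
import Mathlib
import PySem

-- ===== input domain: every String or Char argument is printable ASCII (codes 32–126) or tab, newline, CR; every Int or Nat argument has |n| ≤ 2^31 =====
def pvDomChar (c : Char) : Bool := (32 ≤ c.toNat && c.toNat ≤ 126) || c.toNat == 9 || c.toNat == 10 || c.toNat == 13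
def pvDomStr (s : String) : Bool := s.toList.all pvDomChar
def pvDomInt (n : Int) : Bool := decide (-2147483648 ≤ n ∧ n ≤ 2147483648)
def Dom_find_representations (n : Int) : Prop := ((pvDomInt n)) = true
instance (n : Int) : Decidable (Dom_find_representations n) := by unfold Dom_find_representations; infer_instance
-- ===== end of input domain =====

-- B replaces A's scan of all (a,b) in [2,n)^2 with a walk over the actual powers a^b ≤ n
-- (outer a while a*a ≤ n, inner running product p = a^b), keeping the same stable sort by b.

-- ===== PORT A =====
def find_representations (n : Int) : List (List Int) :=
  let reps := (PySem.List.pyRange 2 n 1).foldl (fun acc a =>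
    (PySem.List.pyRange 2 n 1).foldl (fun acc2 b =>
      let c := n - a ^ b.toNat
      if 0 ≤ c ∧ c < 9 then acc2 ++ [[a, b, c]] else acc2) acc) []
  PySem.List.sorted reps (fun x => PySem.List.pyGetD x 1 0) false

-- ===== PORT B =====
-- inner 'while p <= n' loop of Source B; the Nat argument is fuel (a totality guard only:
-- the loop runs at most (n-2).toNat+1 times and every call supplies at least that)
def pvBInner : Nat → Int → Int → Int → Int → List (List Int)
  | 0, _, _, _, _ => []
  | fuel + 1, n, a, p, b =>
    if p ≤ n then
      (if n - 9 < p then [[a, b, n - p]] else []) ++ pvBInner fuel n a (p * a) (b + 1)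
    else []

-- outer 'while a * a <= n' loop of Source B, same fuel scheme
def pvBOuter : Nat → Int → Int → List (List Int)
  | 0, _, _ => []
  | fuel + 1, n, a =>
    if a * a ≤ n then
      pvBInner n.toNat n a (a * a) 2 ++ pvBOuter fuel n (a + 1)
    else []

def find_representations_alt (n : Int) : List (List Int) :=
  PySem.List.sorted (pvBOuter ((n - 2).toNat + 1) n 2) (fun x => PySem.List.pyGetD x 1 0) false

-- ===== PRECONDITION & SPEC =====
def Spec_find_representations (n : Int) (out : List (List Int)) : Prop := out = find_representations_alt n
instance (n : Int) (out : List (List Int)) : Decidable (Spec_find_representations n out) := by unfold Spec_find_representations; infer_instance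

-- ===== CLAIM (what is proved, stated in full; the proofs are below) =====
def Claim_equal_find_representations : Prop := ∀ (n : Int), Dom_find_representations n → Spec_find_representations n (find_representations n)

-- ===== LEMMAS AND PROOFS =====

-- the conditional appended for one (a, b) pair in A
def pvHit (n a b : Int) : List (List Int) :=
  if 0 ≤ n - a ^ b.toNat ∧ n - a ^ b.toNat < 9 then [[a, b, n - a ^ b.toNat]] else []

-- A's inner b-loop as a flatMap
def pvInnerL (n a : Int) : List (List Int) :=
  (PySem.List.pyRange 2 n 1).flatMap (pvHit n a)

lemma pv_pow_mono (a : Int) (ha : 2 ≤ a) {k l : Nat} (h : k ≤ l) :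
    a ^ k ≤ a ^ l := pow_le_pow_right₀ (by omega) h

lemma pv_self_lt_pow (a b : Int) (ha : 2 ≤ a) (hb : 0 ≤ b) :
    b < a ^ b.toNat := by
  have h1 : (b.toNat : Int) < 2 ^ b.toNat := by exact_mod_cast Nat.lt_two_pow_self
  have h2 : (2:Int) ^ b.toNat ≤ a ^ b.toNat := pow_le_pow_left₀ (by omega) ha _
  omega

-- every b' ≥ b has a^b' ≥ a^b > n, so the tail of A's b-loop appends nothing
lemma pv_flatMap_nil (n a b : Int) (ha : 2 ≤ a) (hb : 0 ≤ b)
    (hbig : n < a ^ b.toNat) :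
    (PySem.List.pyRange b n 1).flatMap (pvHit n a) = [] := by
  rw [List.flatMap_eq_nil_iff]
  intro x hx
  rw [PySem.List.mem_pyRange_one] at hx
  have hmono : a ^ b.toNat ≤ a ^ x.toNat := pv_pow_mono a ha (by omega)
  unfold pvHit
  rw [if_neg (by omega)]

lemma pv_inner_eq (n a : Int) (ha : 2 ≤ a) :
    ∀ (fuel : Nat) (b : Int), 2 ≤ b → (n - b).toNat < fuel →
      (PySem.List.pyRange b n 1).flatMap (pvHit n a) = pvBInner fuel n a (a ^ b.toNat) b := by
  intro fuel
  induction fuel with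
  | zero => intro b _ hf; omega
  | succ fuel IH =>
    intro b hb hf
    by_cases hp : a ^ b.toNat ≤ n
    · have hbn : b < n := lt_of_lt_of_le (pv_self_lt_pow a b ha (by omega)) hp
      rw [PySem.List.pyRange_one_cons hbn, List.flatMap_cons, pvBInner, if_pos hp]
      congr 1
      · unfold pvHit
        rw [if_congr (by omega : (0 ≤ n - a ^ b.toNat ∧ n - a ^ b.toNat < 9) ↔ n - 9 < a ^ b.toNat) rfl rfl]
      · have hsucc : (b + 1).toNat = b.toNat + 1 := by omega
        have hpow : a ^ b.toNat * a = a ^ (b + 1).toNat := by rw [hsucc, pow_succ]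
        rw [hpow]
        exact IH (b + 1) (by omega) (by omega)
    · rw [pvBInner, if_neg hp]
      exact pv_flatMap_nil n a b ha (by omega) (by omega)

lemma pv_outer_eq (n : Int) :
    ∀ (fuel : Nat) (a : Int), 2 ≤ a → (n - a).toNat < fuel →
      (PySem.List.pyRange a n 1).flatMap (pvInnerL n) = pvBOuter fuel n a := by
  intro fuel
  induction fuel with
  | zero => intro a _ hf; omega
  | succ fuel IH =>
    intro a ha hf
    by_cases hg : a * a ≤ n
    · have haa : a * 2 ≤ a * a := mul_le_mul_of_nonneg_left ha (by omega)
      have han : a < n := by omega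
      rw [PySem.List.pyRange_one_cons han, List.flatMap_cons, pvBOuter, if_pos hg]
      congr 1
      · have h2 := pv_inner_eq n a ha n.toNat 2 le_rfl (by omega)
        have hsq : a ^ (2:Int).toNat = a * a := by
          rw [show (2:Int).toNat = 2 from rfl, pow_two]
        rw [pvInnerL, h2, hsq]
      · exact IH (a + 1) (by omega) (by omega)
    · rw [pvBOuter, if_neg hg]
      rw [List.flatMap_eq_nil_iff]
      intro x hx
      rw [PySem.List.mem_pyRange_one] at hx
      have hxx : a * a ≤ x * x := mul_le_mul hx.1 hx.1 (by omega) (by omega)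
      apply pv_flatMap_nil n x 2 (by omega) (by omega)
      have : x ^ (2:Int).toNat = x * x := by
        rw [show (2:Int).toNat = 2 from rfl, pow_two]
      omega

lemma pv_lists_eq (n : Int) :
    (PySem.List.pyRange 2 n 1).foldl (fun acc a =>
      (PySem.List.pyRange 2 n 1).foldl (fun acc2 b =>
        let c := n - a ^ b.toNat
        if 0 ≤ c ∧ c < 9 then acc2 ++ [[a, b, c]] else acc2) acc) []
    = pvBOuter ((n - 2).toNat + 1) n 2 := by
  have h2 : ∀ (a : Int) (acc2 : List (List Int)), ∀ b ∈ PySem.List.pyRange 2 n 1,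
      (let c := n - a ^ b.toNat
       if 0 ≤ c ∧ c < 9 then acc2 ++ [[a, b, c]] else acc2) = acc2 ++ pvHit n a b := by
    intro a acc2 b _
    unfold pvHit
    dsimp only
    split_ifs <;> simp
  have h1 : ∀ (acc : List (List Int)), ∀ a ∈ PySem.List.pyRange 2 n 1,
      ((PySem.List.pyRange 2 n 1).foldl (fun acc2 b =>
        let c := n - a ^ b.toNat
        if 0 ≤ c ∧ c < 9 then acc2 ++ [[a, b, c]] else acc2) acc) = acc ++ pvInnerL n a := by
    intro acc a _
    exact (PySem.List.foldl_congr_mem _ _ (fun acc2 b => acc2 ++ pvHit n a b) _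
      (fun acc2 b hb => h2 a acc2 b hb)).trans (PySem.List.foldl_append_eq_flatMap _ _ _)
  refine ((PySem.List.foldl_congr_mem _ _ (fun acc a => acc ++ pvInnerL n a) _
      (fun acc a hmem => h1 acc a hmem)).trans (PySem.List.foldl_append_eq_flatMap _ _ _)).trans ?_
  rw [List.nil_append]
  exact pv_outer_eq n ((n - 2).toNat + 1) 2 (by norm_num) (by omega)

-- ===== VERDICT (by name: the statement is the Claim_ definition above) =====
theorem find_representations_spec : Claim_equal_find_representations := by
  intro n _
  unfold Spec_find_representations find_representations find_representations_alt
  rw [pv_lists_eq]
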